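-- pv_equiv track=rewrite | github.com/AdamSimkinbgu/Intro-to-CS-Python-Assignments | Assignment2-ListsAsciiOpsLoopsConditions/assignment2.py | string_changer
-- ===== SOURCE A (Python) =====
-- def string_changer(text):
--     """ This method is a lower and upper case letter switching algorithm. A given text is converted, letter by letter,
--         to uppercase from lowercase and vice versa. On the occurrence of "$" in the text, the program toggles off it's
--         conversion feature until the next appearance of "$" in the text. Every odd number of "$" toggles the conversion
--         off and an even number toggles it on (including zero).
--         @param: text [str] - A given text for the program to manipulate according to the rules mentioned
--         @return: Returns a converted list back.                                                                    V"""
--     converted_text = ''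
--     dollar_counter = 0
--     for letter in text:
--         temp = letter
--         if letter == '$':
--             dollar_counter += 1
--             continue
--         if dollar_counter % 2 == 0:
--             if ord('A') <= ord(temp) and ord(temp) <= ord('Z'):
--                 converted_text += chr(ord(temp) + 32)
--                 continue
--             elif ord('a') <= ord(temp) and ord(temp) <= ord('z'):
--                 converted_text += chr(ord(temp) - 32)
--                 continue
--         converted_text += temp
--     return converted_text
-- ===== SOURCE B (Python) =====
-- def _toggle(ch):
--     o = ord(ch)
--     if 65 <= o <= 90:
--         return chr(o + 32)
--     if 97 <= o <= 122:
--         return chr(o - 32)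
--     return ch
--
--
-- def string_changer(text):
--     parts = text.split('$')
--     out = []
--     for i, part in enumerate(parts):
--         if i % 2 == 0:
--             out.append(''.join(_toggle(ch) for ch in part))
--         else:
--             out.append(part)
--     return ''.join(out)
-- ===== Notes on version B (the rewrite author's own statement) =====
-- stated objective: simpler
-- what changed: Replaces the char-by-char loop with a mutable dollar counter by splitting the text at the marker character and case-toggling only the even-indexed segments before joining; segment-level str operations also make it measurably faster.
import Mathlib
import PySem

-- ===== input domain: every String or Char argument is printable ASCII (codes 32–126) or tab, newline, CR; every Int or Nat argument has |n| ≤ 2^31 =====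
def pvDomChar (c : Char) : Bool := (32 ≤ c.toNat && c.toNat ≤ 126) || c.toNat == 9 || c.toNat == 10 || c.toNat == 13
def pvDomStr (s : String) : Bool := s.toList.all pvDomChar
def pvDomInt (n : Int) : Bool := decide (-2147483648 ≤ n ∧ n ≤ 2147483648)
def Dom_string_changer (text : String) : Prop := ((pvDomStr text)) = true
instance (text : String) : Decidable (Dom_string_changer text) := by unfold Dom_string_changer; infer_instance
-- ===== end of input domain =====

-- B splits the text at '$' and case-toggles the even-indexed segments instead of
-- A's char-by-char loop with a dollar counter; objective: simpler. Both total, return value only.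

-- ===== PORT A =====
-- A's loop body: state = (converted_text as List Char, dollar_counter)
def aStep (st : List Char × Nat) (letter : Char) : List Char × Nat :=
  if letter = '$' then (st.1, st.2 + 1)
  else if st.2 % 2 == 0 then
    if 'A'.toNat ≤ letter.toNat ∧ letter.toNat ≤ 'Z'.toNat then
      (st.1 ++ [Char.ofNat (letter.toNat + 32)], st.2)
    else if 'a'.toNat ≤ letter.toNat ∧ letter.toNat ≤ 'z'.toNat then
      (st.1 ++ [Char.ofNat (letter.toNat - 32)], st.2)
    else (st.1 ++ [letter], st.2)
  else (st.1 ++ [letter], st.2)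

def string_changer (text : String) : String :=
  String.mk (text.toList.foldl aStep ([], 0)).1

-- ===== PORT B =====
-- Source B's _toggle
def toggleChar (c : Char) : Char :=
  if 'A'.toNat ≤ c.toNat ∧ c.toNat ≤ 'Z'.toNat then Char.ofNat (c.toNat + 32)
  else if 'a'.toNat ≤ c.toNat ∧ c.toNat ≤ 'z'.toNat then Char.ofNat (c.toNat - 32)
  else c

-- one processed segment of Source B's enumerate loop (strings handled at the List Char level, exact)
def bItem (ip : Int × List Char) : List Char :=
  if PySem.Int.mod ip.1 2 == 0 then ip.2.map toggleChar else ip.2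

def string_changer_alt (text : String) : String :=
  String.mk (PySem.Chars.join []
    ((PySem.List.enumerate (PySem.Chars.splitOn text.toList ['$'])).map bItem))

-- ===== PRECONDITION & SPEC =====
def Spec_string_changer (text : String) (out : String) : Prop := out = string_changer_alt text
instance (text : String) (out : String) : Decidable (Spec_string_changer text out) := by unfold Spec_string_changer; infer_instance

-- ===== CLAIM (what is proved, stated in full; the proofs are below) =====
def Claim_equal_string_changer : Prop := ∀ (text : String), Dom_string_changer text → Spec_string_changer text (string_changer text)

-- ===== LEMMAS AND PROOFS =====

-- reference splitter: split a char list at '$'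
def mySplit : List Char → List (List Char)
  | [] => [[]]
  | c :: l =>
    if c = '$' then [] :: mySplit l
    else
      match mySplit l with
      | [] => [[c]]
      | h :: t => (c :: h) :: t

-- reference semantics: toggle while the parity flag is true, '$' flips it and is dropped
def specA : Bool → List Char → List Char
  | _, [] => []
  | b, c :: l => if c = '$' then specA (!b) l else (if b then toggleChar c else c) :: specA b l

-- alternating join of segments
def altJ : Bool → List (List Char) → List Char
  | _, [] => []
  | b, p :: ps => (if b then p.map toggleChar else p) ++ altJ (!b) ps

lemma mySplit_ne_nil (l : List Char) : mySplit l ≠ [] := by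
  cases l with
  | nil => simp [mySplit]
  | cons c l =>
    simp only [mySplit]
    split
    · simp
    · cases h : mySplit l <;> simp

lemma parityNat (d : Nat) : (((d + 1) % 2 == 0) : Bool) = !(d % 2 == 0) := by
  rcases Nat.mod_two_eq_zero_or_one d with h | h <;> simp [Nat.add_mod, h]

lemma parityInt (n : Int) : ((PySem.Int.mod (n + 1) 2 == 0) : Bool) = !(PySem.Int.mod n 2 == 0) := by
  rw [PySem.Int.mod_eq_emod_of_pos (by norm_num), PySem.Int.mod_eq_emod_of_pos (by norm_num)]
  rcases Int.emod_two_eq_zero_or_one n with h | h <;> simp [Int.add_emod, h]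

lemma foldA (l : List Char) : ∀ (acc : List Char) (d : Nat),
    (l.foldl aStep (acc, d)).1 = acc ++ specA (d % 2 == 0) l := by
  induction l with
  | nil => intro acc d; simp [specA]
  | cons c l ih =>
    intro acc d
    by_cases hc : c = '$'
    · simp [aStep, hc, specA, ih, parityNat]
    · simp only [List.foldl_cons, aStep, if_neg hc, specA, if_neg hc]
      by_cases hd : (d % 2 == 0 : Bool) = true
      · simp only [hd, if_pos rfl, toggleChar]
        split_ifs with h1 h2 <;> simp [ih, hd]
      · simp only [Bool.not_eq_true] at hd
        simp [hd, ih]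

lemma join_nil_cons (p : List Char) (ps : List (List Char)) :
    PySem.Chars.join [] (p :: ps) = p ++ PySem.Chars.join [] ps := by
  cases ps with
  | nil => simp [PySem.Chars.join_singleton, PySem.Chars.join_nil]
  | cons q rest => rw [PySem.Chars.join_cons_cons]; simp

lemma enumJoin (ps : List (List Char)) : ∀ (n : Int),
    PySem.Chars.join [] ((PySem.List.enumerate ps n).map bItem)
      = altJ (PySem.Int.mod n 2 == 0) ps := by
  induction ps with
  | nil => intro n; simp [PySem.List.enumerate, altJ, PySem.Chars.join_nil]
  | cons p ps ih =>
    intro n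
    simp only [PySem.List.enumerate, List.map_cons, join_nil_cons, altJ, ih, parityInt, bItem]

lemma altJ_mySplit (l : List Char) : ∀ b, altJ b (mySplit l) = specA b l := by
  induction l with
  | nil => intro b; simp [mySplit, altJ, specA]
  | cons c l ih =>
    intro b
    by_cases hc : c = '$'
    · simp [mySplit, hc, altJ, specA, ih]
    · simp only [mySplit, if_neg hc, specA, if_neg hc]
      rcases h : mySplit l with _ | ⟨h1, t⟩
      · exact absurd h (mySplit_ne_nil l)
      · have := ih b
        rw [h] at this
        cases b <;> simp_all [altJ]

lemma go_spec : ∀ (fuel : Nat) (l cur : List Char) (acc : List (List Char)),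
    l.length ≤ fuel →
    PySem.Chars.splitOn.go ['$'] fuel l cur acc
      = acc.reverse ++ (mySplit l).modifyHead (cur.reverse ++ ·) := by
  intro fuel
  induction fuel with
  | zero =>
    intro l cur acc hl
    have : l = [] := by cases l <;> simp_all
    subst this
    simp [PySem.Chars.splitOn.go, mySplit]
  | succ fuel ih =>
    intro l cur acc hl
    cases l with
    | nil => simp [PySem.Chars.splitOn.go, mySplit]
    | cons c rest =>
      by_cases hc : c = '$'
      · subst hc
        have hpre : List.isPrefixOf ['$'] ('$' :: rest) = true := by simp [List.isPrefixOf]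
        simp only [PySem.Chars.splitOn.go, hpre, if_true, List.length_nil, List.length_cons,
          Nat.zero_add, List.drop_succ_cons, List.drop_zero]
        rw [ih rest [] _ (by simpa using hl)]
        simp only [mySplit, if_pos rfl]
        cases mySplit rest <;> simp
      · have hpre : List.isPrefixOf ['$'] (c :: rest) = false := by
          simp [List.isPrefixOf]; exact fun h => absurd h.symm hc
        simp only [PySem.Chars.splitOn.go, hpre]
        rw [ih rest (c :: cur) acc (by simpa using Nat.le_of_succ_le_succ hl)]
        simp only [mySplit, if_neg hc]
        rcases h : mySplit rest with _ | ⟨h1, t⟩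
        · exact absurd h (mySplit_ne_nil rest)
        · simp

lemma splitOn_eq_mySplit (l : List Char) :
    PySem.Chars.splitOn l ['$'] = mySplit l := by
  rw [PySem.Chars.splitOn, go_spec (l.length + 1) l [] [] (by omega)]
  rcases h : mySplit l with _ | ⟨h1, t⟩
  · exact absurd h (mySplit_ne_nil l)
  · simp

-- ===== VERDICT (by name: the statement is the Claim_ definition above) =====
theorem string_changer_spec : Claim_equal_string_changer := by
  intro text _
  unfold Spec_string_changer string_changer string_changer_alt
  rw [splitOn_eq_mySplit, enumJoin, altJ_mySplit, foldA]
  rfl
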